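-- pv_equiv track=rewrite | github.com/pypi-data/pypi-mirror-292 | packages/armw/armw-0.1.0a0.tar.gz/armw-0.1.0a0/armw/ros2/util.py | canonicalize_name
-- ===== SOURCE A (Python) =====
-- def canonicalize_name(name):
--     """
--     Put name in canonical form. Double slashes '//' are removed and
--     name is returned without any trailing slash, e.g. /foo/bar
--     @param name: ROS name
--     @type  name: str
--     """
--
--     # Straight up copied from here: https://docs.ros.org/en/melodic/api/rospy/html/rospy.names-pysrc.html
--
--     SEP = '/'
--
--     if not name or name == SEP:
--         return name
--     elif name[0] == SEP:
--         return '/' + '/'.join([x for x in name.split(SEP) if x])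
--     else:
--         return '/'.join([x for x in name.split(SEP) if x])
-- ===== SOURCE B (Python) =====
-- def canonicalize_name(name):
--     """Canonical ROS name: single char pass collapsing slash runs, then drop the
--     (at most one) trailing slash."""
--     if not name or name == '/':
--         return name
--     out = []
--     for c in name:
--         if c == '/' and out and out[-1] == '/':
--             continue
--         out.append(c)
--     if out[-1] == '/' and len(out) > 1:
--         out.pop()
--     return ''.join(out)
-- ===== Notes on version B (the rewrite author's own statement) =====
-- stated objective: alternative
-- what changed: Replaces A's split-on-'/' / filter-empty / join pipeline with a single left-to-right character pass that skips a '/' whenever the last kept character is '/', then pops the at-most-one trailing slash.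
import Mathlib
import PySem

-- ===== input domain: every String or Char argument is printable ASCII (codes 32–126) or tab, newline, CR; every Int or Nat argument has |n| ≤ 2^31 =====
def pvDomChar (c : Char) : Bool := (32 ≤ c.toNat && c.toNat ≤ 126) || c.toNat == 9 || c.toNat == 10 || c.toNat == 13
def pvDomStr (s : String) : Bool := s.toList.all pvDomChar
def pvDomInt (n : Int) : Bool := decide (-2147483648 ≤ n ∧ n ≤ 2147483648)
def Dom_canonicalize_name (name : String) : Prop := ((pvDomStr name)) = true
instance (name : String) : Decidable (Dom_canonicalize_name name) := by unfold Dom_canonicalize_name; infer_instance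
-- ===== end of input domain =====

-- B replaces A's split/filter/join pipeline by one character pass collapsing slash
-- runs plus popping the single possible trailing slash (objective: alternative).

-- ===== PORT A =====
def canonicalize_name (name : String) : String :=
  -- if not name or name == SEP: return name
  if name.toList = [] ∨ name.toList = ['/'] then name
  -- elif name[0] == SEP: return '/' + '/'.join([x for x in name.split(SEP) if x])
  else if PySem.List.pyGet? name.toList 0 = some '/' then
    String.mk ('/' :: PySem.Chars.join ['/']
      ((PySem.Chars.splitOn name.toList ['/']).filter (fun x => x ≠ [])))
  -- else: return '/'.join([x for x in name.split(SEP) if x])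
  else
    String.mk (PySem.Chars.join ['/']
      ((PySem.Chars.splitOn name.toList ['/']).filter (fun x => x ≠ [])))

-- ===== PORT B =====
def canonicalize_name_alt (name : String) : String :=
  -- if not name or name == '/': return name
  if name.toList = [] ∨ name.toList = ['/'] then name
  else
    -- for c in name: skip c when c == '/' and out and out[-1] == '/'
    let out := name.toList.foldl
      (fun out c => if c = '/' ∧ out.getLast? = some '/' then out else out ++ [c]) []
    -- if out[-1] == '/' and len(out) > 1: out.pop()
    String.mk (if out.getLast? = some '/' ∧ 1 < out.length then out.dropLast else out)

-- ===== PRECONDITION & SPEC =====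
def Spec_canonicalize_name (name : String) (out : String) : Prop := out = canonicalize_name_alt name
instance (name : String) (out : String) : Decidable (Spec_canonicalize_name name out) := by unfold Spec_canonicalize_name; infer_instance

-- ===== CLAIM (what is proved, stated in full; the proofs are below) =====
def Claim_equal_canonicalize_name : Prop := ∀ (name : String), Dom_canonicalize_name name → Spec_canonicalize_name name (canonicalize_name name)

-- ===== LEMMAS AND PROOFS =====

/-- Simple reference for splitting a char list at `'/'`. -/
def pvSp : List Char → List (List Char)
  | [] => [[]]
  | c :: rest => if c = '/' then [] :: pvSp rest else (pvSp rest).modifyHead (c :: ·)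

/-- Simple reference for collapsing runs of `'/'`. -/
def pvCol : List Char → List Char
  | [] => []
  | c :: rest =>
    if c = '/' ∧ rest.head? = some '/' then pvCol rest else c :: pvCol rest

theorem pvSp_ne_nil (cs : List Char) : pvSp cs ≠ [] := by
  cases cs with
  | nil => simp [pvSp]
  | cons c rest =>
    by_cases h : c = '/' <;> simp [pvSp, h] <;> cases hr : pvSp rest <;> simp_all [pvSp_ne_nil rest]

theorem pvSp_cons_ne (cs : List Char) : ∃ p0 ps, pvSp cs = p0 :: ps := by
  cases hr : pvSp cs
  · exact absurd hr (pvSp_ne_nil cs)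
  · exact ⟨_, _, rfl⟩

theorem pvSplitOn_go (fuel : Nat) (l cur : List Char) (acc : List (List Char))
    (h : l.length ≤ fuel) :
    PySem.Chars.splitOn.go ['/'] fuel l cur acc
      = acc.reverse ++ (pvSp l).modifyHead (cur.reverse ++ ·) := by
  induction fuel generalizing l cur acc with
  | zero =>
    have : l = [] := by cases l <;> simp_all
    subst this
    rw [PySem.Chars.splitOn.go]
    simp [pvSp]
  | succ f ih =>
    cases l with
    | nil =>
      rw [PySem.Chars.splitOn.go]
      simp [pvSp]
      omega
    | cons c rest =>
      rw [PySem.Chars.splitOn.go]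
      by_cases hc : c = '/'
      · subst hc
        simp only [List.isPrefixOf, BEq.rfl, Bool.true_and, if_pos, List.length_cons,
          List.length_nil, Nat.zero_add, List.drop_succ_cons, List.drop_zero]
        rw [ih rest [] (cur.reverse :: acc) (by simpa using Nat.le_of_succ_le_succ h)]
        obtain ⟨p0, ps, hp⟩ := pvSp_cons_ne rest
        simp [pvSp, hp]
      · have hpre : List.isPrefixOf ['/'] (c :: rest) = false := by
          simp [List.isPrefixOf]; exact fun e => absurd e.symm hc
        simp only [hpre, Bool.false_eq_true, if_neg, not_false_iff]
        rw [ih rest (c :: cur) acc (by simpa using Nat.le_of_succ_le_succ h)]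
        obtain ⟨p0, ps, hp⟩ := pvSp_cons_ne rest
        simp [pvSp, hp, hc]

theorem pvSplitOn_eq (cs : List Char) : PySem.Chars.splitOn cs ['/'] = pvSp cs := by
  rw [PySem.Chars.splitOn, pvSplitOn_go _ _ _ _ (by omega)]
  obtain ⟨p0, ps, hp⟩ := pvSp_cons_ne cs
  simp [hp]

/-- `foldl` form of the collapse equals `pvCol`. -/
theorem pvFoldl_col (cs : List Char) (out : List Char) (a : Char) :
    cs.foldl (fun out c => if c = '/' ∧ out.getLast? = some '/' then out else out ++ [c]) (out ++ [a])
      = out ++ pvCol (a :: cs) := by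
  induction cs generalizing out a with
  | nil => simp [pvCol]
  | cons b rest ih =>
    by_cases hb : b = '/' ∧ a = '/'
    · obtain ⟨hb1, ha1⟩ := hb
      subst hb1; subst ha1
      simp only [List.foldl_cons, List.getLast?_concat]
      rw [if_pos (by simp), ih out '/']
      simp [pvCol]
    · have hcond : ¬ (b = '/' ∧ (out ++ [a]).getLast? = some '/') := by
        rw [List.getLast?_concat]
        intro ⟨h1, h2⟩; exact hb ⟨h1, by simpa using h2⟩
      simp only [List.foldl_cons, if_neg hcond]
      rw [ih (out ++ [a]) b]
      have h3 : pvCol (a :: b :: rest) = a :: pvCol (b :: rest) := by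
        have : ¬ (a = '/' ∧ (b :: rest).head? = some '/') := by
          intro ⟨x1, x2⟩; exact hb ⟨by simpa using x2, x1⟩
        simp only [pvCol, if_neg this]
      rw [h3]; simp
  termination_by cs.length

theorem pvFoldl_col_nil (cs : List Char) :
    cs.foldl (fun out c => if c = '/' ∧ out.getLast? = some '/' then out else out ++ [c]) []
      = pvCol cs := by
  cases cs with
  | nil => simp [pvCol]
  | cons a rest =>
    simp only [List.foldl_cons]
    have h : (if a = '/' ∧ ([] : List Char).getLast? = some '/' then ([] : List Char) else [] ++ [a]) = [a] := by simp
    rw [h]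
    simpa using pvFoldl_col rest [] a

/-- Leading slash kept by A's first branch. -/
def pvLead (cs : List Char) : List Char := if cs.head? = some '/' then ['/'] else []

/-- Trailing slash left by the collapse (dropped by B's final pop). -/
def pvTrail (cs : List Char) : List Char := if cs.getLast? = some '/' then ['/'] else []

/-- A's joined filtered parts. -/
def pvJ (cs : List Char) : List Char :=
  List.intercalate ['/'] ((pvSp cs).filter (fun x => x ≠ []))

theorem pvIc_cons (p : List Char) (l : List (List Char)) :
    List.intercalate ['/'] (p :: l)
      = p ++ (if l = [] then [] else '/' :: List.intercalate ['/'] l) := by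
  cases l with
  | nil => simp [List.intercalate]
  | cons q r => simp [List.intercalate, List.intersperse_cons₂]

theorem pvSp_slash_cons (rest : List Char) : pvSp ('/' :: rest) = [] :: pvSp rest := by
  simp [pvSp]

theorem pvSp_cons_ne_slash (a : Char) (l : List Char) (ha : a ≠ '/') :
    pvSp (a :: l) = (pvSp l).modifyHead (a :: ·) := by
  simp [pvSp, ha]

theorem pvTrail_cons (c : Char) (rest : List Char) (h : rest ≠ []) :
    pvTrail (c :: rest) = pvTrail rest := by
  cases rest with
  | nil => exact absurd rfl h
  | cons b t => rw [pvTrail, pvTrail, List.getLast?_cons_cons]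

theorem pvFilter_nil_iff (cs : List Char) :
    (pvSp cs).filter (fun x => x ≠ []) = [] ↔ ∀ c ∈ cs, c = '/' := by
  induction cs with
  | nil => simp [pvSp]
  | cons c rest ih =>
    by_cases hc : c = '/'
    · subst hc
      rw [pvSp_slash_cons, List.filter_cons_of_neg (by simp), ih]
      simp
    · obtain ⟨p0, ps, hp⟩ := pvSp_cons_ne rest
      simp [pvSp, hc, hp]

theorem pvSp_no_slash (cs : List Char) (p : List Char) (hp : p ∈ pvSp cs) : '/' ∉ p := by
  induction cs generalizing p with
  | nil =>
    simp [pvSp] at hp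
    simp [hp]
  | cons c rest ih =>
    by_cases hc : c = '/'
    · subst hc
      rw [pvSp_slash_cons] at hp
      rcases List.mem_cons.mp hp with h | h
      · simp [h]
      · exact ih p h
    · obtain ⟨p0, ps, hp0⟩ := pvSp_cons_ne rest
      simp only [pvSp, if_neg hc, hp0, List.modifyHead, List.mem_cons] at hp
      rcases hp with h | h
      · subst h
        intro hmem
        rcases List.mem_cons.mp hmem with h | h
        · exact hc h.symm
        · exact ih p0 (hp0 ▸ List.mem_cons_self) h
      · exact ih p (hp0 ▸ List.mem_cons_of_mem _ h)

theorem pvIc_ne_nil (p : List Char) (ps : List (List Char)) (hp : p ≠ []) :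
    List.intercalate ['/'] (p :: ps) ≠ [] := by
  rw [pvIc_cons]; simp [hp]

theorem pvIc_last (f : List (List Char)) (hne : f ≠ [])
    (h1 : ∀ p ∈ f, p ≠ []) (h2 : ∀ p ∈ f, '/' ∉ p) :
    ∃ x, (List.intercalate ['/'] f).getLast? = some x ∧ x ≠ '/' := by
  induction f with
  | nil => exact absurd rfl hne
  | cons p rest ih =>
    cases rest with
    | nil =>
      have hp : p ≠ [] := h1 p List.mem_cons_self
      rw [pvIc_cons]
      refine ⟨p.getLast hp, ?_, ?_⟩
      · simp [List.getLast?_eq_getLast hp]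
      · intro h
        exact h2 p List.mem_cons_self (h ▸ List.getLast_mem hp)
    | cons q r =>
      obtain ⟨x, hx, hxs⟩ := ih (by simp)
        (fun a ha => h1 a (List.mem_cons_of_mem _ ha))
        (fun a ha => h2 a (List.mem_cons_of_mem _ ha))
      have hqr : List.intercalate ['/'] (q :: r) ≠ [] :=
        pvIc_ne_nil q r (h1 q (by simp))
      refine ⟨x, ?_, hxs⟩
      rw [pvIc_cons p (q :: r), if_neg (by simp)]
      rw [List.getLast?_append, List.getLast?_cons, hx]
      simp [List.getLastD_eq_getLast?, hx]

theorem pvAll_last (cs : List Char) (hne : cs ≠ []) (hall : ∀ c ∈ cs, c = '/') :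
    cs.getLast? = some '/' := by
  rw [List.getLast?_eq_getLast hne]
  exact congrArg some (hall _ (List.getLast_mem hne))

theorem pvCol_eq (cs : List Char) :
    pvCol cs = if ∀ c ∈ cs, c = '/' then (if cs = [] then [] else ['/'])
      else pvLead cs ++ pvJ cs ++ pvTrail cs := by
  induction cs with
  | nil => simp [pvCol]
  | cons c rest ih =>
    by_cases hc : c = '/' ∧ rest.head? = some '/'
    · obtain ⟨hc1, hh⟩ := hc
      subst hc1
      have hrne : rest ≠ [] := by cases rest <;> simp_all
      rw [show pvCol ('/' :: rest) = pvCol rest by simp [pvCol, hh]]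
      rw [ih]
      by_cases hall : ∀ c ∈ rest, c = '/'
      · have hall2 : ∀ x ∈ ('/' :: rest), x = '/' := by
          intro x hx
          rcases List.mem_cons.mp hx with e | e
          · exact e
          · exact hall x e
        rw [if_pos hall, if_pos hall2, if_neg hrne, if_neg (List.cons_ne_nil _ _)]
      · have hall2 : ¬ ∀ x ∈ ('/' :: rest), x = '/' := by
          intro h2
          exact hall (fun x hx => h2 x (List.mem_cons_of_mem _ hx))
        rw [if_neg hall, if_neg hall2]
        have hJ : pvJ ('/' :: rest) = pvJ rest := by simp [pvJ, pvSp_slash_cons]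
        have hT : pvTrail ('/' :: rest) = pvTrail rest := pvTrail_cons _ _ hrne
        have hL2 : pvLead rest = ['/'] := by simp [pvLead, hh]
        have hL1 : pvLead ('/' :: rest) = ['/'] := by simp [pvLead]
        rw [hJ, hT, hL2, hL1]
    · have hcol : pvCol (c :: rest) = c :: pvCol rest := by
        simp only [pvCol]
        rw [if_neg hc]
      cases rest with
      | nil =>
        by_cases hcs : c = '/'
        · subst hcs; simp [hcol, pvCol]
        · rw [hcol]
          rw [if_neg (by simp [hcs])]
          simp [pvCol, pvLead, pvTrail, pvJ, pvSp, hcs, pvIc_cons]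
      | cons h t =>
        rw [hcol, ih]
        obtain ⟨p0, ps, hp0⟩ := pvSp_cons_ne (h :: t)
        have hT : pvTrail (c :: h :: t) = pvTrail (h :: t) := pvTrail_cons _ _ (by simp)
        by_cases hcs : c = '/'
        · subst hcs
          have hh : h ≠ '/' := by
            intro e; exact hc ⟨rfl, by simp [e]⟩
          have hnall : ¬ ∀ x ∈ ('/' :: h :: t), x = '/' := by
            intro hx; exact hh (hx h (by simp))
          have hnall2 : ¬ ∀ x ∈ (h :: t), x = '/' := by
            intro hx; exact hh (hx h (by simp))
          rw [if_neg hnall, if_neg hnall2]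
          have hL : pvLead ('/' :: h :: t) = ['/'] := by simp [pvLead]
          have hLr : pvLead (h :: t) = [] := by simp [pvLead, hh]
          have hJ : pvJ ('/' :: h :: t) = pvJ (h :: t) := by simp [pvJ, pvSp_slash_cons]
          rw [hL, hLr, hJ, hT]
          simp
        · have hnall : ¬ ∀ x ∈ (c :: h :: t), x = '/' := by
            intro hx; exact hcs (hx c (by simp))
          rw [if_neg hnall]
          have hL : pvLead (c :: h :: t) = [] := by simp [pvLead, hcs]
          have hsp : pvSp (c :: h :: t) = (c :: p0) :: ps := by
            rw [pvSp_cons_ne_slash c _ hcs, hp0]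
            rfl
          by_cases hh : h = '/'
          · have hp0nil : p0 = [] := by
              subst hh; simp [pvSp] at hp0; exact hp0.1
            subst hp0nil
            by_cases hall : ∀ x ∈ (h :: t), x = '/'
            · have hpsf : ps.filter (fun x => x ≠ []) = [] := by
                have h2 := (pvFilter_nil_iff (h :: t)).mpr hall
                rw [hp0, List.filter_cons_of_neg (by simp)] at h2
                exact h2
              have hJc : pvJ (c :: h :: t) = [c] := by
                rw [pvJ, hsp, List.filter_cons_of_pos (by simp), hpsf, pvIc_cons]
                simp
              rw [if_pos hall, if_neg (by simp), hJc, hL, hT]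
              have : pvTrail (h :: t) = ['/'] := by
                simp [pvTrail, pvAll_last (h :: t) (by simp) hall]
              simp [this]
            · have hpsf : ps.filter (fun x => x ≠ []) ≠ [] := by
                intro e
                apply hall
                apply (pvFilter_nil_iff (h :: t)).mp
                rw [hp0, List.filter_cons_of_neg (by simp)]
                exact e
              have hJr : pvJ (h :: t) = List.intercalate ['/'] (ps.filter (fun x => x ≠ [])) := by
                rw [pvJ, hp0, List.filter_cons_of_neg (by simp)]
              have hJc : pvJ (c :: h :: t) = c :: '/' :: pvJ (h :: t) := by
                rw [pvJ, hsp, List.filter_cons_of_pos (by simp), pvIc_cons,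
                  if_neg (by simpa using hpsf), hJr]
                simp
              have hLr : pvLead (h :: t) = ['/'] := by simp [pvLead, hh]
              rw [if_neg hall, hJc, hL, hLr, hT]
              simp
          · have hp0ne : p0 ≠ [] := by
              intro e
              rw [pvSp_cons_ne_slash h t hh] at hp0
              obtain ⟨q0, qs, hq⟩ := pvSp_cons_ne t
              rw [hq] at hp0
              simp [e] at hp0
            have hnall2 : ¬ ∀ x ∈ (h :: t), x = '/' := by
              intro hx; exact hh (hx h (by simp))
            have hLr : pvLead (h :: t) = [] := by simp [pvLead, hh]
            have hJc : pvJ (c :: h :: t) = c :: pvJ (h :: t) := by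
              rw [pvJ, pvJ, hsp, hp0, List.filter_cons_of_pos (by simp),
                List.filter_cons_of_pos (by simpa using hp0ne), pvIc_cons, pvIc_cons]
              simp
            rw [if_neg hnall2, hJc, hL, hLr, hT]
            simp

-- ===== VERDICT (by name: the statement is the Claim_ definition above) =====
theorem canonicalize_name_spec : Claim_equal_canonicalize_name := by
  intro name _hdom
  unfold Spec_canonicalize_name
  simp only [canonicalize_name, canonicalize_name_alt]
  by_cases hg : name.toList = [] ∨ name.toList = ['/']
  · rw [if_pos hg, if_pos hg]
  · rw [if_neg hg, if_neg hg]
    have hne : name.toList ≠ [] := fun e => hg (Or.inl e)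
    rw [pvFoldl_col_nil, pvCol_eq, PySem.List.pyGet?_zero, pvSplitOn_eq]
    rw [show ∀ l, PySem.Chars.join ['/'] l = List.intercalate ['/'] l from fun _ => rfl]
    by_cases hall : ∀ c ∈ name.toList, c = '/'
    · have hhd : name.toList[0]? = some '/' := by
        cases hl : name.toList with
        | nil => exact absurd hl hne
        | cons a l => simp [hall a (by rw [hl]; simp)]
      rw [if_pos hhd, if_pos hall, if_neg hne, (pvFilter_nil_iff _).mpr hall]
      simp [List.intercalate]
    · rw [if_neg hall]
      set f := (pvSp name.toList).filter (fun x => x ≠ []) with hf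
      have hfne : f ≠ [] := fun e => hall ((pvFilter_nil_iff _).mp e)
      obtain ⟨q, qs, hq⟩ : ∃ q qs, f = q :: qs := by
        cases he : f
        · exact absurd he hfne
        · exact ⟨_, _, rfl⟩
      have hq_ne : q ≠ [] := by
        have hmem : q ∈ List.filter (fun x => decide (x ≠ [])) (pvSp name.toList) := by
          rw [← hf, hq]; simp
        simpa using List.of_mem_filter hmem
      have hJne : List.intercalate ['/'] f ≠ [] := by
        rw [hq]; exact pvIc_ne_nil q qs hq_ne
      obtain ⟨x, hx, hxs⟩ : ∃ x, (List.intercalate ['/'] f).getLast? = some x ∧ x ≠ '/' := by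
        apply pvIc_last f hfne
        · intro p hp
          have hp' : p ∈ List.filter (fun x => decide (x ≠ [])) (pvSp name.toList) := hf ▸ hp
          simpa using List.of_mem_filter hp'
        · intro p hp
          have hp' : p ∈ List.filter (fun x => decide (x ≠ [])) (pvSp name.toList) := hf ▸ hp
          exact pvSp_no_slash _ p (List.mem_of_mem_filter hp')
      rw [show pvJ name.toList = List.intercalate ['/'] f from by rw [pvJ, hf]]
      have hlead : pvLead name.toList = if name.toList[0]? = some '/' then ['/'] else [] := by
        rw [pvLead, List.head?_eq_getElem?]
      by_cases htr : name.toList.getLast? = some '/'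
      · rw [show pvTrail name.toList = ['/'] from by simp [pvTrail, htr]]
        have hside : (pvLead name.toList ++ List.intercalate ['/'] f ++ ['/']).getLast? = some '/'
            ∧ 1 < (pvLead name.toList ++ List.intercalate ['/'] f ++ ['/']).length := by
          constructor
          · rw [List.getLast?_concat]
          · have := List.length_pos_iff.mpr hJne
            simp only [List.length_append, List.length_cons, List.length_nil]
            omega
        rw [if_pos hside, List.dropLast_concat]
        by_cases hhd : name.toList[0]? = some '/'
        · rw [if_pos hhd, hlead, if_pos hhd]; simp
        · rw [if_neg hhd, hlead, if_neg hhd]; simp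
      · rw [show pvTrail name.toList = [] from by simp [pvTrail, htr], List.append_nil]
        have hside : ¬ ((pvLead name.toList ++ List.intercalate ['/'] f).getLast? = some '/'
            ∧ 1 < (pvLead name.toList ++ List.intercalate ['/'] f).length) := by
          intro ⟨h1, _⟩
          rw [List.getLast?_append, hx] at h1
          simp at h1
          exact hxs h1
        rw [if_neg hside]
        by_cases hhd : name.toList[0]? = some '/'
        · rw [if_pos hhd, hlead, if_pos hhd]; simp
        · rw [if_neg hhd, hlead, if_neg hhd]; simp
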